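-- pv_equiv track=rewrite | github.com/IvaVangelova/SoftUni-Python-Fundamentals | 16_bitwise_operations/binary_digits_count_01.py | count_function
-- ===== SOURCE A (Python) =====
-- def count_function(current_number: int, digit: int) -> int:
--     """ Create a counter and check the current number """
--     counter = 0
--     while current_number > 0:
--         remainder = current_number % 2
--         current_number = current_number // 2
--
--         if remainder == digit:
--             counter += 1
--     return counter
-- ===== SOURCE B (Python) =====
-- def count_function(current_number: int, digit: int) -> int:
--     if current_number <= 0 or digit not in (0, 1):
--         return 0
--     return format(current_number, "b").count(str(digit))
-- ===== Notes on version B (the rewrite author's own statement) =====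
-- stated objective: idiomatic
-- what changed: Replaces A's arithmetic bit-extraction while-loop with computing the binary string once (format(n,'b')) and counting the digit character with str.count, after guarding the non-positive and non-binary-digit cases that trivially yield 0.
import Mathlib
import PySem

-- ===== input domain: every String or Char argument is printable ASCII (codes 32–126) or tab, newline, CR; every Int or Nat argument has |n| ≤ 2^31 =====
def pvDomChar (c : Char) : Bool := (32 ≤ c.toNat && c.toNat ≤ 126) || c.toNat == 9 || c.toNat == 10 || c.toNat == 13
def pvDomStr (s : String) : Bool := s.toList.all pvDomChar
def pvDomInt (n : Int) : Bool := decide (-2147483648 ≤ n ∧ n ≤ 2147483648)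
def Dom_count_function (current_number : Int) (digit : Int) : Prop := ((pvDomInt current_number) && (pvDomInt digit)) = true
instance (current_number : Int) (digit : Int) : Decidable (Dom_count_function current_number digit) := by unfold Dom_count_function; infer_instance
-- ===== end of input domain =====

-- B computes the answer from the binary string representation (format(n,'b') + str.count)
-- instead of A's arithmetic bit-extraction loop: a different, more idiomatic decomposition.

-- ===== PORT A =====
-- A's while loop, transliterated as recursion on current_number (halved each step).
def count_function (current_number : Int) (digit : Int) : Int :=
  if h : current_number > 0 then
    (if PySem.Int.mod current_number 2 = digit then 1 else 0) +
      count_function (PySem.Int.floordiv current_number 2) digit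
  else 0
termination_by current_number.toNat
decreasing_by
  rw [PySem.Int.floordiv_eq_ediv_of_pos (by omega : (0:Int) < 2)]
  omega

-- ===== PORT B =====
-- Source B: if current_number <= 0 or digit not in (0,1): return 0
--       return format(current_number, "b").count(str(digit))
def count_function_alt (current_number : Int) (digit : Int) : Int :=
  if current_number ≤ 0 ∨ (digit ≠ 0 ∧ digit ≠ 1) then 0
  else (PySem.Str.count (PySem.Int.toBin current_number) (PySem.Int.toStr digit) : Int)

-- ===== PRECONDITION & SPEC =====
def Spec_count_function (current_number : Int) (digit : Int) (out : Int) : Prop := out = count_function_alt current_number digit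
instance (current_number : Int) (digit : Int) (out : Int) : Decidable (Spec_count_function current_number digit out) := by unfold Spec_count_function; infer_instance

-- ===== CLAIM (what is proved, stated in full; the proofs are below) =====
def Claim_equal_count_function : Prop := ∀ (current_number : Int) (digit : Int), Dom_count_function current_number digit → Spec_count_function current_number digit (count_function current_number digit)

-- ===== LEMMAS AND PROOFS =====

-- single-character Python str.count is List.count
lemma chars_count_go_single (c : Char) : ∀ (fuel : Nat) (s : List Char) (acc : Nat),
    s.length ≤ fuel → PySem.Chars.count.go [c] fuel s acc = acc + s.count c := by
  intro fuel
  induction fuel with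
  | zero => intro s acc h; cases s with
    | nil => simp [PySem.Chars.count.go]
    | cons a t => simp at h
  | succ f ih =>
    intro s acc h
    cases s with
    | nil => simp [PySem.Chars.count.go]
    | cons a t =>
      simp only [PySem.Chars.count.go]
      by_cases hca : c = a
      · subst hca
        simp [List.isPrefixOf, ih t (acc + 1) (by simpa using h)]
        omega
      · simp [List.isPrefixOf, hca, Ne.symm hca, ih t acc (by simpa using h)]

lemma chars_count_single (s : List Char) (c : Char) :
    PySem.Chars.count s [c] = s.count c := by
  simp [PySem.Chars.count, chars_count_go_single c s.length s 0 le_rfl]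

-- A's loop counts the occurrences of the chosen bit among the binary digits of n
lemma count_function_eq_toDigits_count (d : Int) (c : Char) (hd : d = 0 ∨ d = 1)
    (hc : c = if d = 0 then '0' else '1') :
    ∀ (n : Nat), 0 < n → count_function (n : Int) d = ((Nat.toDigits 2 n).count c : Int) := by
  intro n
  induction n using Nat.strong_induction_on with
  | _ n ih =>
    intro hn
    rw [count_function]
    have h2 : ((n : Int) / 2) = ((n / 2 : Nat) : Int) := (Int.natCast_div n 2).symm
    rw [dif_pos (by exact_mod_cast hn)]
    rw [PySem.Int.floordiv_eq_ediv_of_pos (by omega : (0:Int) < 2),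
        PySem.Int.mod_eq_emod_of_pos (by omega : (0:Int) < 2)]
    rw [Nat.toDigits_eq_if (by omega : 1 < 2)]
    by_cases hsmall : n < 2
    · -- n = 1
      have hn1 : n = 1 := by omega
      subst hn1
      rw [count_function]
      rw [dif_neg (by norm_num)]
      rcases hd with h0 | h1 <;> subst_vars <;> decide
    · rw [if_neg hsmall]
      have hhalf : 0 < n / 2 := by omega
      have hlt : n / 2 < n := by omega
      have ihh := ih (n / 2) hlt hhalf
      rw [List.count_append, List.count_singleton]
      have hmod : ((n:Int) % 2) = ((n % 2 : Nat) : Int) := (Int.natCast_mod n 2).symm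
      rw [hmod, h2, ihh]
      have hm2 : n % 2 = 0 ∨ n % 2 = 1 := by omega
      rcases hm2 with hm | hm <;> rw [hm] <;>
        rcases hd with h0 | h1 <;> subst_vars <;> simp [Nat.digitChar] <;> ring

-- A returns 0 when the digit is not a binary digit (the extracted bits are always 0 or 1)
lemma count_function_junk_aux (d : Int) (hd : ¬ (d = 0 ∨ d = 1)) :
    ∀ (k : Nat) (n : Int), n.toNat ≤ k → count_function n d = 0 := by
  intro k
  induction k with
  | zero =>
    intro n h
    rw [count_function, dif_neg (by omega)]
  | succ k ih =>
    intro n h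
    rw [count_function]
    by_cases hn : n > 0
    · rw [dif_pos hn]
      have hm0 : 0 ≤ PySem.Int.mod n 2 := PySem.Int.mod_nonneg n (by omega)
      have hm1 : PySem.Int.mod n 2 < 2 := PySem.Int.mod_lt n (by omega)
      rw [if_neg (by omega)]
      rw [ih (PySem.Int.floordiv n 2)
        (by rw [PySem.Int.floordiv_eq_ediv_of_pos (by omega : (0:Int) < 2)]; omega)]
      ring
    · rw [dif_neg hn]

-- ===== VERDICT (by name: the statement is the Claim_ definition above) =====
theorem count_function_spec : Claim_equal_count_function := by
  intro n d _
  unfold Spec_count_function count_function_alt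
  by_cases hn : n ≤ 0
  · rw [if_pos (Or.inl hn), count_function, dif_neg (by omega)]
  · replace hn : 0 < n := by omega
    by_cases hd : d = 0 ∨ d = 1
    · rw [if_neg (by rcases hd with h | h <;> subst h <;> simp <;> omega)]
      have hpos : 0 < n.toNat := by omega
      have hcastn : ((n.toNat : Int)) = n := Int.toNat_of_nonneg (by omega)
      have hbin : (PySem.Int.toBin n).toList = Nat.toDigits 2 n.toNat := by
        simp [PySem.Int.toList_toBin, PySem.Int.toBinChars, not_lt.mpr (le_of_lt hn)]
      set c : Char := if d = 0 then '0' else '1' with hc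
      have hts : (PySem.Int.toStr d).toList = [c] := by
        rcases hd with h | h <;> subst h <;> decide
      rw [PySem.Str.count_eq, hts, hbin, chars_count_single]
      have := count_function_eq_toDigits_count d c hd hc n.toNat hpos
      rw [hcastn] at this
      exact this
    · rw [if_pos (Or.inr (by omega))]
      exact count_function_junk_aux d hd n.toNat n le_rfl
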